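-- pv_equiv track=rewrite | github.com/wesheets/promethios | src/phase_6_3_1/continuous_monitoring/governance_inheritance_monitor.py | _find_loop_indicators
-- ===== SOURCE A (Python) =====
-- from typing import Dict, List, Any, Optional, Set, Tuple
--
-- def _find_loop_indicators(chain: List[str]) -> List[str]:
--     """
--     Find the entities that appear multiple times in a chain (loop indicators).
--
--     Args:
--         chain: Inheritance chain to check
--
--     Returns:
--         List of entities that appear multiple times
--     """
--     seen = set()
--     duplicates = []
--
--     for entity in chain:
--         if entity in seen:
--             duplicates.append(entity)
--         else:
--             seen.add(entity)
--
--     return duplicates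
-- ===== SOURCE B (Python) =====
-- def _find_loop_indicators(chain):
--     """Find the entities that appear multiple times in a chain (loop indicators).
--
--     Two-stage algorithm: compute the distinct entities, then delete each one's
--     first occurrence from a copy of the chain; what is left over is exactly the
--     later (duplicate) occurrences, in their original interleaved order.
--     """
--     rest = list(chain)
--     for entity in dict.fromkeys(chain):
--         rest.remove(entity)
--     return rest
-- ===== Notes on version B (the rewrite author's own statement) =====
-- stated objective: alternative
-- what changed: Replaces the single-pass seen-set filter by a two-stage subtraction: first dedupe the chain (dict.fromkeys), then delete each distinct entity's first occurrence from a copy of the chain; the leftover list is the duplicates in original order.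
import Mathlib
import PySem

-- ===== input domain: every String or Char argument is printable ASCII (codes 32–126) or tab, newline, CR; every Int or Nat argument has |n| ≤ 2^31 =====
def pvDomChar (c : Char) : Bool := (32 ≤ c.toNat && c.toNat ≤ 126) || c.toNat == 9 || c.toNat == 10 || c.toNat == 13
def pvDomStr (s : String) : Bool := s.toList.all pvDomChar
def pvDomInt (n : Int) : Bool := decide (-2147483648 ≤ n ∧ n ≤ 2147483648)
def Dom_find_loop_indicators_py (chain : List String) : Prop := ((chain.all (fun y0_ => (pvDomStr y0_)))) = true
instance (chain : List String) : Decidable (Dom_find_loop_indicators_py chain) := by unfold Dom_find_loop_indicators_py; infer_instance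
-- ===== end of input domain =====

-- B replaces A's single-pass seen-set filter by a two-stage subtraction: dedupe the chain,
-- then delete each distinct entity's first occurrence from a copy of the chain (alternative
-- decomposition, not faster).

-- ===== PORT A =====
-- one loop step of A: membership in `seen`, else add to `seen`
def pvAStep (st : PySem.Set String × List String) (entity : String) :
    PySem.Set String × List String :=
  if PySem.Set.contains st.1 entity then (st.1, st.2 ++ [entity])
  else (PySem.Set.add st.1 entity, st.2)

def find_loop_indicators_py (chain : List String) : List String :=
  (chain.foldl pvAStep (PySem.Set.empty, [])).2

-- ===== PORT B =====
-- one loop step of B: rest.remove(entity). `.getD rest` only makes the removal total: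
-- each entity comes from dict.fromkeys(chain) and its first occurrence is still in rest,
-- so remove? never returns none here (Python's ValueError is unreachable).
def pvRm (rest : List String) (entity : String) : List String :=
  (PySem.List.remove? rest entity).getD rest

def find_loop_indicators_py_alt (chain : List String) : List String :=
  (PySem.List.dedup chain).foldl pvRm chain

-- ===== PRECONDITION & SPEC =====
def Spec_find_loop_indicators_py (chain : List String) (out : List String) : Prop := out = find_loop_indicators_py_alt chain
instance (chain : List String) (out : List String) : Decidable (Spec_find_loop_indicators_py chain out) := by unfold Spec_find_loop_indicators_py; infer_instance

-- ===== CLAIM (what is proved, stated in full; the proofs are below) =====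
def Claim_equal_find_loop_indicators_py : Prop := ∀ (chain : List String), Dom_find_loop_indicators_py chain → Spec_find_loop_indicators_py chain (find_loop_indicators_py chain)

-- ===== LEMMAS AND PROOFS =====

-- canonical spec of A's loop: duplicates of t relative to a set of already-seen entities
def pvDup (seen : List String) : List String → List String
  | [] => []
  | x :: t => if x ∈ seen then x :: pvDup seen t else pvDup (seen ++ [x]) t

-- first occurrences in t of entities not already in seen
def pvNew (seen : List String) : List String → List String
  | [] => []
  | x :: t => if x ∈ seen then pvNew seen t else x :: pvNew (seen ++ [x]) t

lemma foldA (t : List String) : ∀ (seen acc : List String),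
    (t.foldl pvAStep (seen, acc)).2 = acc ++ pvDup seen t := by
  induction t with
  | nil => intro seen acc; simp [pvDup]
  | cons x t ih =>
    intro seen acc
    by_cases hx : x ∈ seen
    · simp [pvAStep, pvDup, hx, ih]
    · simp [pvAStep, pvDup, PySem.Set.add, hx, ih]

lemma foldAdd (t : List String) : ∀ (s : List String),
    t.foldl PySem.Set.add s = s ++ pvNew s t := by
  induction t with
  | nil => intro s; simp [pvNew]
  | cons x t ih =>
    intro s
    by_cases hx : x ∈ s
    · simp [pvNew, PySem.Set.add, hx, ih]
    · simp [pvNew, PySem.Set.add, hx, ih]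

lemma dedup_eq_pvNew (chain : List String) :
    PySem.List.dedup chain = pvNew [] chain := by
  have : PySem.List.dedup chain = chain.foldl PySem.Set.add [] := rfl
  rw [this, foldAdd]; simp

lemma mem_pvNew (t : List String) : ∀ (seen : List String) (e : String),
    e ∈ pvNew seen t → e ∉ seen := by
  induction t with
  | nil => intro seen e h; simp [pvNew] at h
  | cons x t ih =>
    intro seen e h
    by_cases hx : x ∈ seen
    · exact ih seen e (by simpa [pvNew, hx] using h)
    · simp [pvNew, hx] at h
      rcases h with rfl | h
      · exact hx
      · have := ih (seen ++ [x]) e h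
        intro he; exact this (by simp [he])

lemma foldRm_cons (d : List String) : ∀ (l : List String) (x : String),
    (∀ e ∈ d, e ≠ x) → d.foldl pvRm (x :: l) = x :: d.foldl pvRm l := by
  induction d with
  | nil => intro l x _; simp
  | cons e d ih =>
    intro l x h
    have hex : x ≠ e := fun hh => (h e (by simp)) hh.symm
    have hstep : pvRm (x :: l) e = x :: pvRm l e := by
      rw [pvRm, PySem.List.remove?_cons_of_ne l hex]
      cases hr : PySem.List.remove? l e <;> simp [pvRm, hr]
    simp only [List.foldl_cons, hstep]
    exact ih (pvRm l e) x (fun e' he' => h e' (by simp [he']))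

lemma main_lemma (t : List String) : ∀ (seen : List String),
    (pvNew seen t).foldl pvRm t = pvDup seen t := by
  induction t with
  | nil => intro seen; simp [pvNew, pvDup]
  | cons x t ih =>
    intro seen
    by_cases hx : x ∈ seen
    · have hne : ∀ e ∈ pvNew seen t, e ≠ x := fun e he heq => by
        exact mem_pvNew t seen e he (heq ▸ hx)
      simp only [pvNew, pvDup, if_pos hx]
      rw [foldRm_cons _ t x hne, ih seen]
    · simp only [pvNew, pvDup, if_neg hx, List.foldl_cons]
      have : pvRm (x :: t) x = t := by simp [pvRm]
      rw [this, ih (seen ++ [x])]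

-- ===== VERDICT (by name: the statement is the Claim_ definition above) =====
theorem find_loop_indicators_py_spec : Claim_equal_find_loop_indicators_py := by
  intro chain _
  unfold Spec_find_loop_indicators_py find_loop_indicators_py find_loop_indicators_py_alt
  rw [dedup_eq_pvNew, main_lemma]
  have := foldA chain [] []
  simpa [PySem.Set.empty] using this
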